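-- pv_equiv track=rewrite | github.com/jamangi/AjaxTests | fundamentals.py | read_shebang
-- ===== SOURCE A (Python) =====
-- def read_shebang(text):
--     """ Read shebang and deduce programming language """
--     lines = text.splitlines()
--     if lines[0][0] == "#":
--         comment = lines[0]
--         interpreter = ''
--         for i in range(len(comment)-1, -1, -1):
--             if comment[i] == ' ' or comment[i] == '/':
--                 break
--             interpreter = comment[i] + interpreter
--         return interpreter
--     else:
--         return 'bash'
-- ===== SOURCE B (Python) =====
-- def read_shebang(text):
--     """ Read shebang and deduce programming language """
--     lines = text.splitlines()
--     if lines[0][0] != "#":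
--         return 'bash'
--     interpreter = ''
--     for ch in lines[0]:
--         interpreter = '' if ch in ' /' else interpreter + ch
--     return interpreter
-- ===== Notes on version B (the rewrite author's own statement) =====
-- stated objective: alternative
-- what changed: Replaces the backward indexed scan with break and character prepending by a single forward pass over the line that resets the accumulator at every space or slash, so the value left at the end is the suffix after the last delimiter.
import Mathlib
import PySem

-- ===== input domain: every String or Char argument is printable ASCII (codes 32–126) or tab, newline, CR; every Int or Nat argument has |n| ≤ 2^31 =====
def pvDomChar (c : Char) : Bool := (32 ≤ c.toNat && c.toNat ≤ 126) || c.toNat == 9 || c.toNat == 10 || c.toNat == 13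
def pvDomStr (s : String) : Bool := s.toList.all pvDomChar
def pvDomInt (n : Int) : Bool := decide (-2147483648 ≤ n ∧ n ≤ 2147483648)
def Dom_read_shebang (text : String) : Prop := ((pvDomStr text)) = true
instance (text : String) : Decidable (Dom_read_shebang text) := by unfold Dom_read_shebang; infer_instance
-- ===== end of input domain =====

-- B replaces A's backward indexed scan with break by one forward pass that resets at ' ' or '/' (objective: alternative).


-- ===== PORT A =====
-- A's loop: for i in range(len(comment)-1, -1, -1): break on ' '/'/' else prepend; fuel k = i+1
def read_shebang_loop (c : List Char) : Nat → List Char → List Char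
  | 0, acc => acc
  | k+1, acc =>
    let ch := c.getD k ' '
    if ch = ' ' ∨ ch = '/' then acc else read_shebang_loop c k (ch :: acc)

def read_shebang (text : String) : String :=
  let lines := PySem.Str.splitlines text
  match PySem.List.pyGet? lines 0 with
  | none => ""          -- lines[0] raises IndexError: excluded by Pre_
  | some comment =>
    match PySem.Str.pyGet? comment 0 with
    | none => ""        -- lines[0][0] raises IndexError: excluded by Pre_
    | some c0 =>
      if c0 = '#' then
        String.ofList (read_shebang_loop comment.toList comment.toList.length [])
      else "bash"

-- ===== PORT B =====
def read_shebang_alt (text : String) : String :=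
  let lines := PySem.Str.splitlines text
  match PySem.List.pyGet? lines 0 with
  | none => ""          -- lines[0] raises IndexError: excluded by Pre_
  | some line =>
    match PySem.Str.pyGet? line 0 with
    | none => ""        -- lines[0][0] raises IndexError: excluded by Pre_
    | some c0 =>
      if c0 ≠ '#' then "bash"
      else
        String.ofList (line.toList.foldl
          (fun acc ch => if ch = ' ' ∨ ch = '/' then [] else acc ++ [ch]) [])

-- ===== PRECONDITION & SPEC =====
-- Pre_ excludes exactly the inputs where A raises IndexError: text with no lines, or an empty first line.
def Pre_read_shebang (text : String) : Prop :=
  PySem.Str.splitlines text ≠ [] ∧ ((PySem.Str.splitlines text).headD "") ≠ ""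
instance (text : String) : Decidable (Pre_read_shebang text) := by unfold Pre_read_shebang; infer_instance

def pvWitness_read_shebang : String := "#!/usr/bin/python3"

def Spec_read_shebang (text : String) (out : String) : Prop := out = read_shebang_alt text
instance (text : String) (out : String) : Decidable (Spec_read_shebang text out) := by unfold Spec_read_shebang; infer_instance

-- ===== CLAIM (what is proved, stated in full; the proofs are below) =====
def Claim_equal_read_shebang : Prop := ∀ (text : String), Dom_read_shebang text → Pre_read_shebang text → Spec_read_shebang text (read_shebang text)

-- ===== LEMMAS AND PROOFS =====
theorem read_shebang_loop_eq_foldl (cs : List Char) :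
    ∀ (k : Nat) (acc : List Char), k ≤ cs.length →
    read_shebang_loop cs k acc =
      (cs.take k).foldl (fun acc ch => if ch = ' ' ∨ ch = '/' then [] else acc ++ [ch]) [] ++ acc := by
  intro k
  induction k with
  | zero => intro acc _; simp [read_shebang_loop]
  | succ k ih =>
    intro acc hk
    have hklt : k < cs.length := Nat.lt_of_succ_le hk
    have hget : cs.getD k ' ' = (cs[k]'hklt) := List.getD_eq_getElem cs ' ' hklt
    have htake : cs.take (k+1) = cs.take k ++ [(cs[k]'hklt)] := by
      rw [List.take_add_one, List.getElem?_eq_getElem hklt]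
      rfl
    rw [read_shebang_loop]
    simp only [hget, htake, List.foldl_append, List.foldl_cons, List.foldl_nil]
    by_cases h : (cs[k]'hklt) = ' ' ∨ (cs[k]'hklt) = '/'
    · rw [if_pos h, if_pos h]; rfl
    · rw [if_neg h, if_neg h, ih _ (Nat.le_of_lt hklt), List.append_assoc]
      rfl

-- ===== VERDICT (by name: the statement is the Claim_ definition above) =====
theorem read_shebang_spec : Claim_equal_read_shebang := by
  intro text _ _
  unfold Spec_read_shebang read_shebang read_shebang_alt
  cases h1 : PySem.List.pyGet? (PySem.Str.splitlines text) 0 with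
  | none => simp only [h1]
  | some line =>
    cases h2 : PySem.Str.pyGet? line 0 with
    | none => simp only [h1, h2]
    | some c0 =>
      simp only [h1, h2]
      by_cases hc : c0 = '#'
      · simp only [hc, ne_eq, not_true_eq_false, if_true, if_false]
        rw [read_shebang_loop_eq_foldl line.toList line.toList.length [] (le_refl _), List.take_length,
          List.append_nil]
      · simp [hc]
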